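-- pv_equiv track=rewrite | github.com/adfras/ClaimVerify | rag_pipeline/preprocess.py | paragraph_spans
-- ===== SOURCE A (Python) =====
-- from typing import Iterable, Sequence
--
-- def paragraph_spans(text: str) -> Sequence[tuple[int, int]]:
--     spans: list[tuple[int, int]] = []
--     start = 0
--     while start < len(text):
--         next_break = text.find("\n\n", start)
--         if next_break == -1:
--             spans.append((start, len(text)))
--             break
--         spans.append((start, next_break))
--         start = next_break + 2
--     return spans
-- ===== SOURCE B (Python) =====
-- def paragraph_spans(text):
--     parts = text.split("\n\n")
--     spans = []
--     pos = 0
--     for part in parts: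
--         end = pos + len(part)
--         spans.append((pos, end))
--         pos = end + 2
--     if spans and spans[-1][0] == len(text):
--         spans.pop()
--     return spans
-- ===== Notes on version B (the rewrite author's own statement) =====
-- stated objective: alternative
-- what changed: Replaces A's scan-and-advance find loop (with in-loop sentinel/break trailing logic) by one str.split call on the blank-line separator, a cumulative-length pass over the parts, and a single trailing-span pop guard.
import Mathlib
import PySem

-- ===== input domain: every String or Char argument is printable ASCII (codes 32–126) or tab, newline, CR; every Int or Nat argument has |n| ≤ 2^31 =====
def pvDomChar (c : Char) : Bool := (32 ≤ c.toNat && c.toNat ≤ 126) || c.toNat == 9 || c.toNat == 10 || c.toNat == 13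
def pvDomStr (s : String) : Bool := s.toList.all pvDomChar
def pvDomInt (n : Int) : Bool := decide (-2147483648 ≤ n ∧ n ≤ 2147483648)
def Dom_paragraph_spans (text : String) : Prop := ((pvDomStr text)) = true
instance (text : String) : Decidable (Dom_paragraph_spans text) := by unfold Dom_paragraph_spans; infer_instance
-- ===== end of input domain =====

-- B replaces A's scan-and-advance find loop by split("\n\n") + a cumulative-length pass + one trailing pop guard (alternative decomposition, same cost).

-- ===== PORT A =====
-- the separator "\n\n", as a char list (both ports work on text.toList)
def pvSep : List Char := ['\n', '\n']

-- A's while loop: start advances past each break; fuel length+1 is ample since start strictly increases each iteration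
def pyA_loop (s : List Char) (start : Nat) (fuel : Nat) : List (Int × Int) :=
  match fuel with
  | 0 => []
  | fuel + 1 =>
    if start < s.length then
      let nb := PySem.Chars.findFrom s pvSep (start : Int)
      if nb = -1 then [((start : Int), (s.length : Int))]
      else ((start : Int), nb) :: pyA_loop s (nb.toNat + 2) fuel
    else []

def paragraph_spans (text : String) : List (Int × Int) :=
  pyA_loop text.toList 0 (text.toList.length + 1)

-- ===== PORT B =====
def paragraph_spans_alt (text : String) : List (Int × Int) :=
  let parts := PySem.Chars.splitOn text.toList pvSep
  let st := parts.foldl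
    (fun (st : List (Int × Int) × Int) part =>
      (st.1 ++ [(st.2, st.2 + (part.length : Int))], st.2 + (part.length : Int) + 2))
    ([], 0)
  let spans := st.1
  if spans.getLast?.elim false (fun p => p.1 == (text.toList.length : Int)) then
    spans.dropLast
  else spans

-- ===== PRECONDITION & SPEC =====
def Spec_paragraph_spans (text : String) (out : List (Int × Int)) : Prop := out = paragraph_spans_alt text
instance (text : String) (out : List (Int × Int)) : Decidable (Spec_paragraph_spans text out) := by unfold Spec_paragraph_spans; infer_instance

-- ===== CLAIM (what is proved, stated in full; the proofs are below) =====
def Claim_equal_paragraph_spans : Prop := ∀ (text : String), Dom_paragraph_spans text → Spec_paragraph_spans text (paragraph_spans text)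

-- ===== LEMMAS AND PROOFS =====

-- if the separator occurs, the first occurrence leaves at least 2 chars from its index
theorem pv_find_bound {l : List Char} (h : PySem.Chars.find l pvSep ≠ -1) :
    0 ≤ PySem.Chars.find l pvSep ∧ (PySem.Chars.find l pvSep).toNat + 2 ≤ l.length := by
  have h0 : 0 ≤ PySem.Chars.find l pvSep := by
    have := PySem.Chars.neg_one_le_find l pvSep; omega
  obtain ⟨hpref, -⟩ := PySem.Chars.find_spec h0
  have hlen := hpref.length_le
  rw [List.length_drop] at hlen
  have hsl : pvSep.length = 2 := rfl
  exact ⟨h0, by omega⟩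

-- the recursive characterisation of split("\n\n")
def mySplit (l : List Char) : List (List Char) :=
  if h : PySem.Chars.find l pvSep = -1 then [l]
  else
    List.take (PySem.Chars.find l pvSep).toNat l ::
      mySplit (List.drop ((PySem.Chars.find l pvSep).toNat + 2) l)
termination_by l.length
decreasing_by
  have hb := pv_find_bound h
  simp only [List.length_drop]
  omega

-- does A's scan end exactly at a break (the recursion bottoms out on the empty suffix)?
def tailEmpty (l : List Char) : Bool :=
  if h : PySem.Chars.find l pvSep = -1 then l.isEmpty
  else tailEmpty (List.drop ((PySem.Chars.find l pvSep).toNat + 2) l)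
termination_by l.length
decreasing_by
  have hb := pv_find_bound h
  simp only [List.length_drop]
  omega

-- the spans A's loop produces on the suffix l, offset off
def spansRel (l : List Char) (off : Int) : List (Int × Int) :=
  if h : PySem.Chars.find l pvSep = -1 then
    (if l.isEmpty then [] else [(off, off + l.length)])
  else
    (off, off + PySem.Chars.find l pvSep) ::
      spansRel (List.drop ((PySem.Chars.find l pvSep).toNat + 2) l)
        (off + PySem.Chars.find l pvSep + 2)
termination_by l.length
decreasing_by
  have hb := pv_find_bound h
  simp only [List.length_drop]
  omega

-- B's span-building pass, recursively
def buildSpans : List (List Char) → Int → List (Int × Int)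
  | [], _ => []
  | p :: ps, pos => (pos, pos + (p.length : Int)) :: buildSpans ps (pos + (p.length : Int) + 2)

theorem pv_find_nil : PySem.Chars.find ([] : List Char) pvSep = -1 := by decide

theorem pv_mySplit_nil : mySplit [] = [[]] := by
  rw [mySplit]; simp [pv_find_nil]

theorem pv_mySplit_ne_nil (l : List Char) : mySplit l ≠ [] := by
  rw [mySplit]; split <;> simp

theorem pv_find_prefix {l : List Char} (h : pvSep <+: l) : PySem.Chars.find l pvSep = 0 := by
  have h0 : 0 ≤ PySem.Chars.find l pvSep :=
    (PySem.Chars.find_nonneg_iff l pvSep).2 h.isInfix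
  obtain ⟨-, hmin⟩ := PySem.Chars.find_spec h0
  by_contra hne
  have hpos : 0 < (PySem.Chars.find l pvSep).toNat := by omega
  exact hmin 0 hpos (by simpa using h)

theorem pv_find_cons {c : Char} {rest : List Char} (h : ¬ pvSep <+: (c :: rest)) :
    PySem.Chars.find (c :: rest) pvSep =
      if PySem.Chars.find rest pvSep = -1 then -1 else 1 + PySem.Chars.find rest pvSep := by
  split_ifs with hr
  · have hnr : ¬ pvSep <:+: rest := (PySem.Chars.find_eq_neg_one_iff rest pvSep).1 hr
    refine (PySem.Chars.find_eq_neg_one_iff _ _).2 ?_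
    intro hin
    rcases List.infix_cons_iff.1 hin with hp | hi
    · exact h hp
    · exact hnr hi
  · have hr0 : 0 ≤ PySem.Chars.find rest pvSep := by
      have := PySem.Chars.neg_one_le_find rest pvSep; omega
    obtain ⟨hpref_r, hmin_r⟩ := PySem.Chars.find_spec hr0
    have hin : pvSep <:+: (c :: rest) :=
      List.infix_cons_iff.2 (Or.inr ((PySem.Chars.find_nonneg_iff rest pvSep).1 hr0))
    have h0 : 0 ≤ PySem.Chars.find (c :: rest) pvSep :=
      (PySem.Chars.find_nonneg_iff _ _).2 hin
    obtain ⟨hpref, hmin⟩ := PySem.Chars.find_spec h0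
    have hfne : (PySem.Chars.find (c :: rest) pvSep).toNat ≠ 0 := by
      intro h0'
      rw [h0'] at hpref; simp at hpref; exact h hpref
    have h1 : ¬ ((PySem.Chars.find (c :: rest) pvSep).toNat >
        (PySem.Chars.find rest pvSep).toNat + 1) := by
      intro hgt
      exact hmin ((PySem.Chars.find rest pvSep).toNat + 1) hgt (by simpa using hpref_r)
    have h2 : ¬ ((PySem.Chars.find (c :: rest) pvSep).toNat <
        (PySem.Chars.find rest pvSep).toNat + 1) := by
      intro hlt
      obtain ⟨m, hm⟩ : ∃ m, (PySem.Chars.find (c :: rest) pvSep).toNat = m + 1 :=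
        ⟨(PySem.Chars.find (c :: rest) pvSep).toNat - 1, by omega⟩
      apply hmin_r m (by omega)
      rw [hm] at hpref; simpa using hpref
    omega

theorem pv_mySplit_headI_tail (l : List Char) :
    (mySplit l).headI :: (mySplit l).tail = mySplit l := by
  cases h : mySplit l with
  | nil => exact absurd h (pv_mySplit_ne_nil l)
  | cons a t => rfl

theorem pv_splitOn_go_eq : ∀ (fuel : Nat) (l cur : List Char) (acc : List (List Char)),
    l.length < fuel →
    PySem.Chars.splitOn.go pvSep fuel l cur acc
      = acc.reverse ++ (cur.reverse ++ (mySplit l).headI) :: (mySplit l).tail := by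
  intro fuel
  induction fuel with
  | zero => intro l cur acc h; omega
  | succ fuel ih =>
    intro l cur acc h
    cases l with
    | nil =>
      rw [PySem.Chars.splitOn.go.eq_def]
      simp [pv_mySplit_nil]
    | cons c rest =>
      rw [PySem.Chars.splitOn.go.eq_def]
      simp only []
      by_cases hpre : pvSep.isPrefixOf (c :: rest) = true
      · rw [if_pos hpre]
        have hp : pvSep <+: (c :: rest) := List.isPrefixOf_iff_prefix.1 hpre
        have hlen : (List.drop pvSep.length (c :: rest)).length < fuel := by
          have hsl : pvSep.length = 2 := rfl
          simp only [List.length_drop, hsl, List.length_cons]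
          have h' : rest.length + 1 < fuel + 1 := by simpa using h
          omega
        rw [ih _ _ _ hlen]
        have hsplit : mySplit (c :: rest)
            = [] :: mySplit (List.drop 2 (c :: rest)) := by
          rw [mySplit, dif_neg (by rw [pv_find_prefix hp]; norm_num)]
          rw [pv_find_prefix hp]
          simp
        rw [hsplit]
        have hsl : pvSep.length = 2 := rfl
        rw [hsl]
        simp only [List.reverse_cons, List.headI_cons, List.tail_cons, List.reverse_nil,
          List.nil_append, List.append_assoc]
        rw [← pv_mySplit_headI_tail (List.drop 2 (c :: rest))]
        simp
      · rw [if_neg hpre]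
        have hlen : rest.length < fuel := by simp at h; omega
        rw [ih _ _ _ hlen]
        have hnp : ¬ pvSep <+: (c :: rest) := fun hpp => hpre (List.isPrefixOf_iff_prefix.2 hpp)
        have hfc := pv_find_cons hnp
        by_cases hr : PySem.Chars.find rest pvSep = -1
        · have h1 : mySplit (c :: rest) = [c :: rest] := by
            rw [mySplit, dif_pos (by rw [hfc]; simp [hr])]
          have h2 : mySplit rest = [rest] := by rw [mySplit, dif_pos hr]
          rw [h1, h2]
          simp
        · have hr0 : 0 ≤ PySem.Chars.find rest pvSep := by
            have := PySem.Chars.neg_one_le_find rest pvSep; omega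
          have h2 : mySplit rest
              = List.take (PySem.Chars.find rest pvSep).toNat rest ::
                mySplit (List.drop ((PySem.Chars.find rest pvSep).toNat + 2) rest) := by
            rw [mySplit, dif_neg hr]
          have h1 : mySplit (c :: rest)
              = (c :: List.take (PySem.Chars.find rest pvSep).toNat rest) ::
                mySplit (List.drop ((PySem.Chars.find rest pvSep).toNat + 2) rest) := by
            rw [mySplit, dif_neg (by rw [hfc, if_neg hr]; omega)]
            rw [hfc, if_neg hr]
            have htn : (1 + PySem.Chars.find rest pvSep).toNat
                = (PySem.Chars.find rest pvSep).toNat + 1 := by omega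
            rw [htn, List.take_succ_cons]
            have h3 : (PySem.Chars.find rest pvSep).toNat + 1 + 2
                = ((PySem.Chars.find rest pvSep).toNat + 2) + 1 := by omega
            rw [h3, List.drop_succ_cons]
          rw [h1, h2]
          simp

theorem pv_splitOn_eq_mySplit (l : List Char) :
    PySem.Chars.splitOn l pvSep = mySplit l := by
  rw [PySem.Chars.splitOn, pv_splitOn_go_eq (l.length + 1) l [] [] (by omega)]
  simp [pv_mySplit_headI_tail]

theorem pv_foldl_build : ∀ (parts : List (List Char)) (spans0 : List (Int × Int)) (pos : Int),
    (parts.foldl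
      (fun (st : List (Int × Int) × Int) part =>
        (st.1 ++ [(st.2, st.2 + (part.length : Int))], st.2 + (part.length : Int) + 2))
      (spans0, pos)).1 = spans0 ++ buildSpans parts pos := by
  intro parts
  induction parts with
  | nil => intro spans0 pos; simp [buildSpans]
  | cons p ps ih =>
    intro spans0 pos
    simp only [List.foldl_cons, buildSpans, ih]
    simp

theorem pv_main_nil (off : Int) : buildSpans (mySplit []) off
    = spansRel [] off ++
      (if tailEmpty [] then [(off + ((([] : List Char)).length : Int),
        off + ((([] : List Char)).length : Int))] else []) := by
  rw [pv_mySplit_nil, spansRel, tailEmpty]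
  simp [pv_find_nil, buildSpans]

theorem pv_main : ∀ (n : Nat) (l : List Char) (off : Int), l.length ≤ n →
    buildSpans (mySplit l) off
      = spansRel l off ++
        (if tailEmpty l then [(off + (l.length : Int), off + (l.length : Int))] else []) := by
  intro n
  induction n with
  | zero =>
    intro l off h
    have : l = [] := by cases l with | nil => rfl | cons a t => simp at h
    subst this
    exact pv_main_nil off
  | succ n ihn =>
    intro l off h
    by_cases hnil : l = []
    · subst hnil; exact pv_main_nil off
    by_cases hf : PySem.Chars.find l pvSep = -1
    · have h1 : mySplit l = [l] := by rw [mySplit, dif_pos hf]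
      rw [h1, spansRel, dif_pos hf, tailEmpty, dif_pos hf]
      simp [buildSpans, List.isEmpty_iff, hnil]
    · have hb := pv_find_bound hf
      have h1 : mySplit l
          = List.take (PySem.Chars.find l pvSep).toNat l ::
            mySplit (List.drop ((PySem.Chars.find l pvSep).toNat + 2) l) := by
        rw [mySplit, dif_neg hf]
      rw [h1]
      simp only [buildSpans]
      have hlen : (List.take (PySem.Chars.find l pvSep).toNat l).length
          = (PySem.Chars.find l pvSep).toNat := by
        rw [List.length_take]; omega
      rw [hlen]
      conv_rhs => rw [spansRel, dif_neg hf, tailEmpty, dif_neg hf]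
      rw [ihn (List.drop ((PySem.Chars.find l pvSep).toNat + 2) l)
        (off + ((PySem.Chars.find l pvSep).toNat : Int) + 2)
        (by simp only [List.length_drop]; omega)]
      rw [Int.toNat_of_nonneg hb.1]
      have hd : (((List.drop ((PySem.Chars.find l pvSep).toNat + 2) l).length : Nat) : Int)
          = (l.length : Int) - PySem.Chars.find l pvSep - 2 := by
        rw [List.length_drop]; omega
      rw [hd]
      have hXY : off + PySem.Chars.find l pvSep + 2 +
          ((l.length : Int) - PySem.Chars.find l pvSep - 2) = off + (l.length : Int) := by ring
      rw [hXY]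
      simp

theorem pv_spansRel_ne_nil {l : List Char} (h : l ≠ []) (off : Int) : spansRel l off ≠ [] := by
  rw [spansRel]; split
  · simp [h]
  · simp

theorem pv_lastFst : ∀ (n : Nat) (l : List Char) (off : Int), l.length ≤ n → l ≠ [] →
    tailEmpty l = false →
    ∀ p, (spansRel l off).getLast? = some p → p.1 < off + (l.length : Int) := by
  intro n
  induction n with
  | zero =>
    intro l off h hnil
    cases l with
    | nil => simp at hnil
    | cons a t => simp at h
  | succ n ihn =>
    intro l off h hnil hte p hp
    by_cases hf : PySem.Chars.find l pvSep = -1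
    · rw [spansRel, dif_pos hf, if_neg (by simp [List.isEmpty_iff, hnil])] at hp
      simp at hp
      have hlp : 1 ≤ l.length := List.length_pos_of_ne_nil hnil
      rw [← hp]
      simp
      omega
    · have hb := pv_find_bound hf
      rw [tailEmpty, dif_neg hf] at hte
      have hdnil : List.drop ((PySem.Chars.find l pvSep).toNat + 2) l ≠ [] := by
        intro h0
        rw [h0, tailEmpty, dif_pos pv_find_nil] at hte
        simp at hte
      rw [spansRel, dif_neg hf] at hp
      have hp' : (spansRel (List.drop ((PySem.Chars.find l pvSep).toNat + 2) l)
          (off + PySem.Chars.find l pvSep + 2)).getLast? = some p := by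
        cases hx : spansRel (List.drop ((PySem.Chars.find l pvSep).toNat + 2) l)
            (off + PySem.Chars.find l pvSep + 2) with
        | nil => exact absurd hx (pv_spansRel_ne_nil hdnil _)
        | cons b t =>
          rw [hx] at hp
          rw [List.getLast?_cons_cons] at hp
          exact hp
      have hrec := ihn (List.drop ((PySem.Chars.find l pvSep).toNat + 2) l)
        (off + PySem.Chars.find l pvSep + 2)
        (by simp only [List.length_drop]; omega) hdnil hte p hp'
      rw [List.length_drop] at hrec
      omega

theorem pv_loopA : ∀ (fuel : Nat) (s : List Char) (start : Nat), start ≤ s.length →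
    s.length - start < fuel →
    pyA_loop s start fuel = spansRel (s.drop start) (start : Int) := by
  intro fuel
  induction fuel with
  | zero => intro s start h1 h2; omega
  | succ fuel ih =>
    intro s start h1 h2
    by_cases hlt : start < s.length
    · simp only [pyA_loop, if_pos hlt, PySem.Chars.findFrom_natCast s pvSep start h1]
      by_cases hf : PySem.Chars.find (s.drop start) pvSep = -1
      · rw [if_pos hf, if_pos rfl, spansRel, dif_pos hf,
          if_neg (by simp [List.isEmpty_iff, List.drop_eq_nil_iff]; omega)]
        simp only [List.length_drop]
        have : ((s.length - start : Nat) : Int) = (s.length : Int) - start := by omega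
        rw [this]
        norm_num
      · have hb := pv_find_bound hf
        rw [List.length_drop] at hb
        rw [if_neg hf, if_neg (by omega), spansRel, dif_neg hf]
        have htn : (((start : Int) + PySem.Chars.find (s.drop start) pvSep).toNat)
            = start + (PySem.Chars.find (s.drop start) pvSep).toNat := by omega
        rw [htn]
        have hrec := ih s (start + (PySem.Chars.find (s.drop start) pvSep).toNat + 2)
          (by omega) (by omega)
        have hoff : ((start + (PySem.Chars.find (s.drop start) pvSep).toNat + 2 : Nat) : Int)
            = (start : Int) + PySem.Chars.find (s.drop start) pvSep + 2 := by
          have hb1 := hb.1; omega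
        rw [hrec, List.drop_drop, ← Nat.add_assoc, hoff]
    · simp only [pyA_loop, if_neg hlt]
      have hd : List.drop start s = [] := List.drop_eq_nil_of_le (by omega)
      rw [hd, spansRel]
      simp [pv_find_nil]

-- ===== VERDICT (by name: the statement is the Claim_ definition above) =====
theorem paragraph_spans_spec : Claim_equal_paragraph_spans := by
  intro text _
  unfold Spec_paragraph_spans paragraph_spans
  simp only [paragraph_spans_alt]
  set l := text.toList with hl
  have hA : pyA_loop l 0 (l.length + 1) = spansRel l 0 := by
    have := pv_loopA (l.length + 1) l 0 (by omega) (by omega)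
    simpa using this
  rw [hA, pv_splitOn_eq_mySplit, pv_foldl_build, List.nil_append,
    pv_main l.length l 0 le_rfl]
  cases hte : tailEmpty l with
  | true =>
    rw [if_pos rfl, List.getLast?_concat]
    simp
  | false =>
    rw [if_neg Bool.false_ne_true, List.append_nil]
    by_cases hnil : l = []
    · rw [hnil, tailEmpty] at hte
      simp [pv_find_nil] at hte
    · obtain ⟨p, hp⟩ := Option.isSome_iff_exists.mp
        (List.getLast?_isSome.mpr (pv_spansRel_ne_nil hnil 0))
      have hlt := pv_lastFst l.length l 0 le_rfl hnil hte p hp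
      have hbeq : (p.1 == (l.length : Int)) = false := by
        simp only [beq_eq_false_iff_ne, ne_eq]; omega
      rw [if_neg (by simp [hp, hbeq])]
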